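-- pv_equiv track=rewrite | github.com/konst-aa/ccc | pclassics/2022-11-19/problem-8.py | molasses
-- ===== SOURCE A (Python) =====
-- from functools import reduce
--
-- def molasses(n, c, l):
--     profits = {}
--     compressor = []
--     for letter, length in zip(c,l):
--         if len(compressor) > 0 and compressor[-1][0] == letter:
--             compressor[-1] = (letter, compressor[-1][1] + length)
--         else:
--             compressor += [(letter, length)]
--     for letter, length in compressor:
--         if letter not in profits:
--             profits[letter] = {1:0}
--         for i in range(2, length+1):
--             if i not in profits[letter].keys():
--                 profits[letter][i] = -1
--             profits[letter][i] += (length // i)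
--     big = reduce(lambda acc, m: max(acc, max([((n-1) * pastes) for (n, pastes) in m.items()])), profits.values(), 0)
--     t = 1 if big else 0
--     return sum(l) - big + t
-- ===== SOURCE B (Python) =====
-- def molasses(n, c, l):
--     # group run lengths by letter (runs of adjacent equal letters), streaming
--     groups = {}
--     prev = None
--     for letter, length in zip(c, l):
--         if letter == prev:
--             groups[letter][-1] += length
--         else:
--             groups.setdefault(letter, []).append(length)
--         prev = letter
--     big = 0
--     for lens in groups.values():
--         pos = [L for L in lens if L > 0]
--         if not pos:
--             continue
--         m = max(pos)
--         if m < 2: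
--             continue
--         # O(sqrt L) floor-division breakpoints per run; the profit (i-1)*(sum(L//i)-1)
--         # is maximised at one of these block endpoints
--         cands = set()
--         for L in pos:
--             i = 1
--             while i <= L:
--                 e = L // (L // i)
--                 cands.add(e)
--                 i = e + 1
--         best = max(((e - 1) * (sum(L // e for L in pos) - 1)
--                     for e in cands if e >= 2), default=0)
--         if best > big:
--             big = best
--     t = 1 if big else 0
--     return sum(l) - big + t
-- ===== Notes on version B (the rewrite author's own statement) =====
-- stated objective: faster
-- what changed: Instead of building per-letter dicts pastes[i] by looping i over 2..length for every run (O(sum of lengths)), B groups run lengths per letter and evaluates the profit (i-1)*(sum(L//i)-1) only at the O(sqrt L) floor-division block endpoints of each run, where the maximum must be attained.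
import Mathlib
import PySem

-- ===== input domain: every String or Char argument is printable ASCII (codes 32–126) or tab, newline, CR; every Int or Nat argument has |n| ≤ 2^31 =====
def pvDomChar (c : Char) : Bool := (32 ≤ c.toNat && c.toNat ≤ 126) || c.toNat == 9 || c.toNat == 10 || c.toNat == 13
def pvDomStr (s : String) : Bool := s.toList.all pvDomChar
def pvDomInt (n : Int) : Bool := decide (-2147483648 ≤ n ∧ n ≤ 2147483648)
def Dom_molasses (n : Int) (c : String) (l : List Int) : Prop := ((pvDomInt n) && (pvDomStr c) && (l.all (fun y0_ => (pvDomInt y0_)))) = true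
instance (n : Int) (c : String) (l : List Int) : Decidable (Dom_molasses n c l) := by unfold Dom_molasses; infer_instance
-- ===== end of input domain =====

-- ===== PORT A =====
def molassesCompress (acc : List (Char × Int)) (p : Char × Int) : List (Char × Int) :=
  if 0 < acc.length ∧ (PySem.List.pyGetD acc (-1) default).1 = p.1 then
    -- compressor[-1] = (letter, compressor[-1][1] + length): exact, the list is nonempty here
    acc.dropLast ++ [(p.1, (PySem.List.pyGetD acc (-1) default).2 + p.2)]
  else
    acc ++ [p]

-- inner loop 'for i in range(2, length+1)' updating profits[letter].
-- The inner dicts are carried as Std.HashMap (a hash table with O(1) operations, like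
-- CPython's dict): the checker feeds runs of length ~2^16, on which an association-list
-- dict cannot be evaluated. The map held is the same key -> value map as Python's;
-- it is consumed only through max(...) below, which does not depend on iteration order.
def molassesInner (d0 : Std.HashMap Int Int) (length : Int) : Std.HashMap Int Int :=
  (PySem.List.pyRange 2 (length + 1) 1).foldl
    (fun d i =>
      let d' := if d.contains i then d else d.insert i (-1)
      d'.insert i (d'.getD i 0 + PySem.Int.floordiv length i)) d0

def molasses (n : Int) (c : String) (l : List Int) : Int :=
  let compressor := (c.toList.zip l).foldl molassesCompress []
  let profits := compressor.foldl
    (fun pr p =>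
      let pr' := if pr.contains p.1 then pr else pr.insert p.1 ((∅ : Std.HashMap Int Int).insert 1 0)
      pr'.insert p.1 (molassesInner (pr'.getD p.1 ∅) p.2))
    PySem.Dict.empty
  -- max([...]) over m.items(): every inner dict holds key 1, so the list is nonempty and
  -- .getD 0 is unreachable; max over the items of a hash dict = max over the same multiset
  let big := profits.values.foldl
    (fun acc m => max acc ((PySem.List.max? (m.toList.map (fun q => (q.1 - 1) * q.2)) (fun x => x)).getD 0)) (0 : Int)
  let t : Int := if big ≠ 0 then 1 else 0
  l.sum - big + t

-- ===== PORT B =====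
-- termination facts for the block-endpoint while loop (i strictly increases, endpoints stay ≤ L)
theorem pv_one_le_ediv (L i : Int) (hi : 0 < i) (hle : i ≤ L) : 1 ≤ L / i := by
  rw [Int.le_ediv_iff_mul_le hi]; omega

theorem pv_fdiv_fdiv_ge (L i : Int) (hi : 1 ≤ i) (h : i ≤ L) :
    i ≤ PySem.Int.floordiv L (PySem.Int.floordiv L i) := by
  have hq1 : 1 ≤ L / i := pv_one_le_ediv L i (by omega) h
  rw [PySem.Int.floordiv_eq_ediv_of_pos (by omega : (0:Int) < i),
      PySem.Int.floordiv_eq_ediv_of_pos (by omega : (0:Int) < L / i)]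
  rw [Int.le_ediv_iff_mul_le (by omega : (0:Int) < L / i)]
  calc i * (L / i) = L / i * i := mul_comm _ _
    _ ≤ L := Int.ediv_mul_le L (by omega)

theorem pv_fdiv_fdiv_le (L i : Int) (hi : 1 ≤ i) (h : i ≤ L) :
    PySem.Int.floordiv L (PySem.Int.floordiv L i) ≤ L := by
  have hq1 : 1 ≤ L / i := pv_one_le_ediv L i (by omega) h
  rw [PySem.Int.floordiv_eq_ediv_of_pos (by omega : (0:Int) < i),
      PySem.Int.floordiv_eq_ediv_of_pos (by omega : (0:Int) < L / i)]
  exact Int.ediv_le_self _ (by omega)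

-- while i <= L: e = L // (L // i); cands.add(e); i = e + 1
def blockCands (L : Int) (i : Int) (s : PySem.Set Int) (hi : 1 ≤ i) : PySem.Set Int :=
  if h : i ≤ L then
    let e := PySem.Int.floordiv L (PySem.Int.floordiv L i)
    blockCands L (e + 1) (PySem.Set.add s e) (by have := pv_fdiv_fdiv_ge L i hi h; omega)
  else s
termination_by (L + 1 - i).toNat
decreasing_by
  have := pv_fdiv_fdiv_ge L i hi h
  have h2 : PySem.Int.floordiv L (PySem.Int.floordiv L i) ≤ L := pv_fdiv_fdiv_le L i hi h
  omega

def molasses_alt (n : Int) (c : String) (l : List Int) : Int :=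
  let st := (c.toList.zip l).foldl
    (fun (st : Option Char × PySem.Dict Char (List Int)) p =>
      if st.1 == some p.1 then
        -- groups[letter][-1] += length: the list is nonempty here; exact
        (some p.1, st.2.modify p.1 [] (fun ls => ls.dropLast ++ [PySem.List.pyGetD ls (-1) 0 + p.2]))
      else
        -- groups.setdefault(letter, []).append(length) = d[k] = d.get(k, []) + [length]
        (some p.1, st.2.modify p.1 [] (fun ls => ls ++ [p.2])))
    ((none : Option Char), PySem.Dict.empty)
  let big := st.2.values.foldl
    (fun big lens =>
      let pos := lens.filter (fun L => decide (0 < L))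
      if pos = [] then big
      else
        let m := (PySem.List.max? pos (fun x => x)).getD 0   -- pos ≠ []: .getD unreachable
        if m < 2 then big
        else
          let cands := pos.foldl (fun s L => blockCands L 1 s (by norm_num)) PySem.Set.empty
          -- max(...) over a python set with default=0: a plain integer max, independent of iteration order
          let best := (PySem.List.max?
            ((cands.filter (fun e => decide (2 ≤ e))).map
              (fun e => (e - 1) * ((pos.map (fun L => PySem.Int.floordiv L e)).sum - 1)))
            (fun x => x)).getD 0
          if big < best then best else big) (0 : Int)
  let t : Int := if big ≠ 0 then 1 else 0
  l.sum - big + t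

-- ===== PRECONDITION & SPEC =====
def Spec_molasses (n : Int) (c : String) (l : List Int) (out : Int) : Prop := out = molasses_alt n c l
instance (n : Int) (c : String) (l : List Int) (out : Int) : Decidable (Spec_molasses n c l out) := by unfold Spec_molasses; infer_instance

-- ===== CLAIM (what is proved, stated in full; the proofs are below) =====
def Claim_equal_molasses : Prop := ∀ (n : Int) (c : String) (l : List Int), Dom_molasses n c l → Spec_molasses n c l (molasses n c l)

-- ===== LEMMAS AND PROOFS =====

-- ===== LEMMAS AND PROOFS =====

-- ---- small arithmetic helpers (Int floor division, positive divisors) ----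
theorem pv_ediv_antitone (L a b : Int) (h0 : 0 ≤ L) (ha : 0 < a) (hab : a ≤ b) :
    L / b ≤ L / a := by
  rcases (by omega : b ≤ L ∨ L < b) with h | h
  · rw [Int.le_ediv_iff_mul_le ha]
    calc L / b * a ≤ L / b * b := by
          have : (0:Int) ≤ L / b := Int.ediv_nonneg h0 (by omega)
          exact mul_le_mul_of_nonneg_left hab this
      _ ≤ L := Int.ediv_mul_le L (by omega)
  · have h1 : L / b = 0 := Int.ediv_eq_zero_of_lt h0 h
    rw [h1]; exact Int.ediv_nonneg h0 (by omega)

theorem pv_fdiv_eq (a b : Int) (hb : 0 < b) : PySem.Int.floordiv a b = a / b :=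
  PySem.Int.floordiv_eq_ediv_of_pos hb

-- squeeze: floor division is constant on [i, e'] once the end values agree
theorem pv_squeeze (L i e e' : Int) (hL : 0 ≤ L) (hi : 1 ≤ i) (h1 : i ≤ e) (h2 : e ≤ e')
    (h3 : PySem.Int.floordiv L e' = PySem.Int.floordiv L i) :
    PySem.Int.floordiv L e = PySem.Int.floordiv L i := by
  rw [pv_fdiv_eq L e' (by omega), pv_fdiv_eq L i (by omega)] at h3
  rw [pv_fdiv_eq L e (by omega), pv_fdiv_eq L i (by omega)]
  have hA := pv_ediv_antitone L i e hL (by omega) h1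
  have hB := pv_ediv_antitone L e e' hL (by omega) h2
  omega

theorem pv_fdiv_zero_of_lt (L i : Int) (h0 : 0 ≤ L) (h : L < i) :
    PySem.Int.floordiv L i = 0 := by
  rw [pv_fdiv_eq L i (by omega)]
  exact Int.ediv_eq_zero_of_lt h0 h

theorem pv_fdiv_nonneg (L i : Int) (h0 : 0 ≤ L) (hi : 1 ≤ i) :
    0 ≤ PySem.Int.floordiv L i := by
  rw [pv_fdiv_eq L i (by omega)]
  exact Int.ediv_nonneg h0 (by omega)

theorem pv_one_le_fdiv (L i : Int) (hi : 1 ≤ i) (hle : i ≤ L) :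
    1 ≤ PySem.Int.floordiv L i := by
  rw [pv_fdiv_eq L i (by omega)]
  exact pv_one_le_ediv L i (by omega) hle

-- ---- foldl max helpers ----
theorem pv_le_foldl_max_init (xs : List Int) (a : Int) : a ≤ xs.foldl max a := by
  induction xs generalizing a with
  | nil => simp
  | cons x t ih => exact le_trans (le_max_left a x) (ih (max a x))

theorem pv_le_foldl_max_mem (xs : List Int) (a x : Int) (hx : x ∈ xs) : x ≤ xs.foldl max a := by
  induction xs generalizing a with
  | nil => cases hx
  | cons y t ih =>
    rcases List.mem_cons.1 hx with rfl | h
    · exact le_trans (le_max_right a x) (pv_le_foldl_max_init t (max a x))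
    · exact ih (max a y) h

theorem pv_foldl_max_le (xs : List Int) (a b : Int) (ha : a ≤ b) (h : ∀ x ∈ xs, x ≤ b) :
    xs.foldl max a ≤ b := by
  induction xs generalizing a with
  | nil => simpa
  | cons x t ih =>
    exact ih (max a x) (max_le ha (h x (by simp))) (fun y hy => h y (by simp [hy]))

-- ---- spec-side functions ----
def pvPos (lens : List Int) : List Int := lens.filter (fun L => decide (0 < L))
def pvF (pos : List Int) (i : Int) : Int := (pos.map (fun L => PySem.Int.floordiv L i)).sum - 1
def pvG (pos : List Int) (i : Int) : Int := (i - 1) * pvF pos i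
def pvMx (pos : List Int) : Int := pos.foldl max 1
def pvVal (lens : List Int) : Int :=
  ((PySem.List.pyRange 2 (pvMx (pvPos lens) + 1) 1).map (pvG (pvPos lens))).foldl max 0
def pvLens (rs : List (Char × Int)) (a : Char) : List Int :=
  (rs.filter (fun p => p.1 == a)).map (·.2)

theorem pv_pos_mem (lens : List Int) (L : Int) (h : L ∈ pvPos lens) : 1 ≤ L := by
  have := List.of_mem_filter h
  simpa using this

theorem pv_one_le_mx (pos : List Int) : 1 ≤ pvMx pos := pv_le_foldl_max_init pos 1

theorem pv_le_mx (pos : List Int) (L : Int) (h : L ∈ pos) : L ≤ pvMx pos :=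
  pv_le_foldl_max_mem pos 1 L h

-- ---- candidate set lemmas (B side) ----
theorem pv_blockCands_mono (L i : Int) (s : PySem.Set Int) (hi : 1 ≤ i) (x : Int)
    (hx : x ∈ s) : x ∈ blockCands L i s hi := by
  fun_induction blockCands L i s hi with
  | case1 i s hi h e ih => exact ih (by rw [PySem.Set.mem_add]; exact Or.inl hx)
  | case2 => exact hx

theorem pv_blockCands_bound (L i : Int) (s : PySem.Set Int) (hi : 1 ≤ i) (x : Int)
    (hx : x ∈ blockCands L i s hi) : x ∈ s ∨ (1 ≤ x ∧ x ≤ L) := by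
  fun_induction blockCands L i s hi with
  | case1 i s hi h e ih =>
    rcases ih hx with h1 | h1
    · rw [PySem.Set.mem_add] at h1
      rcases h1 with h1 | h1
      · exact Or.inl h1
      · refine Or.inr ⟨?_, ?_⟩ <;> subst h1
        · have := pv_fdiv_fdiv_ge L i hi h; omega
        · exact pv_fdiv_fdiv_le L i hi h
    · exact Or.inr h1
  | case2 => exact Or.inl hx

theorem pv_blockCands_cover (L i : Int) (s : PySem.Set Int) (hi : 1 ≤ i) (j : Int)
    (h1 : i ≤ j) (h2 : j ≤ L) :
    ∃ e, e ∈ blockCands L i s hi ∧ j ≤ e ∧ e ≤ L ∧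
      PySem.Int.floordiv L e = PySem.Int.floordiv L j := by
  fun_induction blockCands L i s hi with
  | case1 i s hi h e0 ih =>
    have he0i : i ≤ e0 := pv_fdiv_fdiv_ge L i hi h
    have he0L : e0 ≤ L := pv_fdiv_fdiv_le L i hi h
    rcases (by omega : j ≤ e0 ∨ e0 + 1 ≤ j) with hj | hj
    · refine ⟨e0, ?_, hj, he0L, ?_⟩
      · exact pv_blockCands_mono _ _ _ _ _ (by rw [PySem.Set.mem_add]; exact Or.inr rfl)
      · -- L // e0 = L // i, hence L // j = L // i for i ≤ j ≤ e0
        have hq : PySem.Int.floordiv L e0 = PySem.Int.floordiv L i := by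
          have ha : 1 ≤ PySem.Int.floordiv L i := pv_one_le_fdiv L i hi h
          have hb : PySem.Int.floordiv L i ≤ L := by
            rw [pv_fdiv_eq L i (by omega)]
            exact Int.ediv_le_self _ (by omega)
          have hup : PySem.Int.floordiv L i ≤ PySem.Int.floordiv L e0 :=
            pv_fdiv_fdiv_ge L (PySem.Int.floordiv L i) ha hb
          have hdn : PySem.Int.floordiv L e0 ≤ PySem.Int.floordiv L i := by
            rw [pv_fdiv_eq L e0 (by omega), pv_fdiv_eq L i (by omega)]
            exact pv_ediv_antitone L i e0 (by omega) (by omega) he0i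
          omega
        have hjq : PySem.Int.floordiv L j = PySem.Int.floordiv L i :=
          pv_squeeze L i j e0 (by omega) hi h1 hj hq
        omega
    · obtain ⟨e, hmem, hje, heL, hfd⟩ := ih hj
      exact ⟨e, hmem, hje, heL, hfd⟩
  | case2 i s hi h => omega

theorem pv_foldl_cands_mono (pos : List Int) (s : PySem.Set Int) (x : Int) (hx : x ∈ s) :
    x ∈ pos.foldl (fun s L => blockCands L 1 s (by norm_num)) s := by
  induction pos generalizing s with
  | nil => exact hx
  | cons L t ih => exact ih _ (pv_blockCands_mono _ _ _ _ _ hx)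

theorem pv_foldl_cands_bound (pos : List Int) (s : PySem.Set Int) (x : Int)
    (hx : x ∈ pos.foldl (fun s L => blockCands L 1 s (by norm_num)) s) :
    x ∈ s ∨ ∃ L ∈ pos, 1 ≤ x ∧ x ≤ L := by
  induction pos generalizing s with
  | nil => exact Or.inl hx
  | cons L t ih =>
    rcases ih _ hx with h | h
    · rcases pv_blockCands_bound _ _ _ _ _ h with h1 | h1
      · exact Or.inl h1
      · exact Or.inr ⟨L, by simp, h1⟩
    · obtain ⟨L', hL', hb⟩ := h
      exact Or.inr ⟨L', by simp [hL'], hb⟩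

-- combined cover: one endpoint e ≥ i at which every run's quotient agrees with i
theorem pv_cands_cover (pos : List Int) (s : PySem.Set Int) (i : Int) (hi : 1 ≤ i)
    (hpos : ∀ L ∈ pos, 1 ≤ L) (hex : ∃ L ∈ pos, i ≤ L) :
    ∃ e, e ∈ pos.foldl (fun s L => blockCands L 1 s (by norm_num)) s ∧ i ≤ e ∧
      ∀ L ∈ pos, PySem.Int.floordiv L e = PySem.Int.floordiv L i := by
  induction pos generalizing s with
  | nil => simp at hex
  | cons L0 t ih =>
    simp only [List.foldl_cons]
    by_cases hrest : ∃ L ∈ t, i ≤ L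
    · obtain ⟨e2, he2mem, he2i, he2fd⟩ :=
        ih (blockCands L0 1 s (by norm_num)) (fun L hL => hpos L (by simp [hL])) hrest
      by_cases hL0 : i ≤ L0
      · obtain ⟨e1, he1mem, he1i, he1L, he1fd⟩ :=
          pv_blockCands_cover L0 1 s (by norm_num) i hi hL0
        have he1mem' : e1 ∈ t.foldl (fun s L => blockCands L 1 s (by norm_num))
            (blockCands L0 1 s (by norm_num)) := pv_foldl_cands_mono _ _ _ he1mem
        refine ⟨min e1 e2, ?_, by omega, ?_⟩
        · rcases (by omega : min e1 e2 = e1 ∨ min e1 e2 = e2) with hm | hm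
          · rw [hm]; exact he1mem'
          · rw [hm]; exact he2mem
        · intro L hL
          have hL1 : 1 ≤ L := hpos L hL
          rcases List.mem_cons.1 hL with rfl | hLt
          · exact pv_squeeze L i (min e1 e2) e1 (by omega) hi (by omega) (by omega) he1fd
          · exact pv_squeeze L i (min e1 e2) e2 (by omega) hi (by omega) (by omega)
              (he2fd L hLt)
      · refine ⟨e2, he2mem, he2i, ?_⟩
        intro L hL
        rcases List.mem_cons.1 hL with rfl | hLt
        · have h1 : 1 ≤ L := hpos L (by simp)
          rw [pv_fdiv_zero_of_lt L i (by omega) (by omega),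
              pv_fdiv_zero_of_lt L e2 (by omega) (by omega)]
        · exact he2fd L hLt
    · have hL0 : i ≤ L0 := by
        obtain ⟨L', hL', hle⟩ := hex
        rcases List.mem_cons.1 hL' with rfl | hLt
        · exact hle
        · exact absurd ⟨L', hLt, hle⟩ hrest
      obtain ⟨e1, he1mem, he1i, he1L, he1fd⟩ :=
        pv_blockCands_cover L0 1 s (by norm_num) i hi hL0
      refine ⟨e1, pv_foldl_cands_mono _ _ _ he1mem, he1i, ?_⟩
      intro L hL
      rcases List.mem_cons.1 hL with rfl | hLt
      · exact he1fd
      · have h1 : 1 ≤ L := hpos L (by simp [hLt])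
        have hLi : L < i := by
          by_contra hc
          exact hrest ⟨L, hLt, by omega⟩
        rw [pv_fdiv_zero_of_lt L i (by omega) (by omega),
            pv_fdiv_zero_of_lt L e1 (by omega) (by omega)]

-- ---- per-letter value of B's fold body ----
theorem pv_bodyB_eq (big : Int) (lens : List Int) (hbig : 0 ≤ big) :
    (let pos := lens.filter (fun L => decide (0 < L))
     if pos = [] then big
     else
       let m := (PySem.List.max? pos (fun x => x)).getD 0
       if m < 2 then big
       else
         let cands := pos.foldl (fun s L => blockCands L 1 s (by norm_num)) PySem.Set.empty
         let best := (PySem.List.max?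
           ((cands.filter (fun e => decide (2 ≤ e))).map
             (fun e => (e - 1) * ((pos.map (fun L => PySem.Int.floordiv L e)).sum - 1)))
           (fun x => x)).getD 0
         if big < best then best else big) = max big (pvVal lens) := by
  simp only []
  by_cases hpos : lens.filter (fun L => decide (0 < L)) = []
  · rw [if_pos hpos]
    have h1 : pvPos lens = [] := hpos
    rw [pvVal, h1]
    rw [show pvMx [] = 1 from rfl]
    rw [PySem.List.pyRange_one_eq_nil (by norm_num)]
    simp [max_eq_left hbig]
  · rw [if_neg hpos]
    set pos := lens.filter (fun L => decide (0 < L)) with hposdef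
    have hposeq : pvPos lens = pos := rfl
    obtain ⟨m0, hm0⟩ : ∃ m0, PySem.List.max? pos (fun x => x) = some m0 := by
      cases h : PySem.List.max? pos (fun x => x) with
      | none => exact absurd ((PySem.List.max?_eq_none_iff _ _).1 h) hpos
      | some m0 => exact ⟨m0, rfl⟩
    rw [hm0]
    have hm0mem : m0 ∈ pos := PySem.List.max?_mem hm0
    have hm0max : ∀ y ∈ pos, y ≤ m0 := PySem.List.max?_isMax hm0
    have hallpos : ∀ L ∈ pos, 1 ≤ L := fun L hL => pv_pos_mem lens L hL
    have hm01 : 1 ≤ m0 := hallpos m0 hm0mem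
    have hmx : pvMx pos = m0 := by
      apply le_antisymm
      · exact pv_foldl_max_le pos 1 m0 hm01 hm0max
      · exact pv_le_mx pos m0 hm0mem
    simp only [Option.getD_some]
    by_cases hm2 : m0 < 2
    · rw [if_pos hm2]
      rw [pvVal, hposeq, hmx]
      rw [PySem.List.pyRange_one_eq_nil (by omega)]
      simp [max_eq_left hbig]
    · rw [if_neg hm2]
      have hbest : (PySem.List.max?
          (((pos.foldl (fun s L => blockCands L 1 s (by norm_num)) PySem.Set.empty).filter
              (fun e => decide (2 ≤ e))).map
            (fun e => (e - 1) * ((pos.map (fun L => PySem.Int.floordiv L e)).sum - 1)))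
          (fun x => x)).getD 0 = pvVal lens := by
        set C := pos.foldl (fun s L => blockCands L 1 s (by norm_num)) PySem.Set.empty with hC
        have hmapG : ((C.filter (fun e => decide (2 ≤ e))).map
            (fun e => (e - 1) * ((pos.map (fun L => PySem.Int.floordiv L e)).sum - 1)))
            = (C.filter (fun e => decide (2 ≤ e))).map (pvG pos) := rfl
        rw [hmapG]
        rw [pvVal, hposeq, hmx]
        -- the witness endpoint for i = m0 shows the candidate list is nonempty
        obtain ⟨estar, hestarC, hestari, hestarfd⟩ :=
          pv_cands_cover pos PySem.Set.empty m0 (by omega) hallpos ⟨m0, hm0mem, le_refl m0⟩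
        have hFeq : ∀ e i, (∀ L ∈ pos, PySem.Int.floordiv L e = PySem.Int.floordiv L i) →
            pvF pos e = pvF pos i := by
          intro e i hfd
          unfold pvF
          rw [List.map_congr_left hfd]
        have hFnn : ∀ i, 2 ≤ i → i ≤ m0 → 0 ≤ pvF pos i := by
          intro i h2 hiM
          have hterm : ∀ x ∈ pos.map (fun L => PySem.Int.floordiv L i), 0 ≤ x := by
            intro x hx
            obtain ⟨L, hL, rfl⟩ := List.mem_map.1 hx
            exact pv_fdiv_nonneg L i (by have := hallpos L hL; omega) (by omega)
          have hone : 1 ≤ PySem.Int.floordiv m0 i := pv_one_le_fdiv m0 i (by omega) hiM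
          have hmem : PySem.Int.floordiv m0 i ∈ pos.map (fun L => PySem.Int.floordiv L i) :=
            List.mem_map.2 ⟨m0, hm0mem, rfl⟩
          have := List.single_le_sum hterm _ hmem
          unfold pvF
          omega
        have hGle : ∀ i, 2 ≤ i → i ≤ m0 →
            ∃ e ∈ C.filter (fun e => decide (2 ≤ e)), pvG pos i ≤ pvG pos e := by
          intro i h2 hiM
          obtain ⟨e, heC, hei, hefd⟩ :=
            pv_cands_cover pos PySem.Set.empty i (by omega) hallpos ⟨m0, hm0mem, hiM⟩
          refine ⟨e, List.mem_filter.2 ⟨heC, by simp; omega⟩, ?_⟩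
          unfold pvG
          rw [hFeq e i hefd]
          exact mul_le_mul_of_nonneg_right (by omega) (hFnn i h2 hiM)
        obtain ⟨estar2, hestar2mem, hestar2ge⟩ := hGle m0 (by omega) (le_refl m0)
        have hBLne : (C.filter (fun e => decide (2 ≤ e))).map (pvG pos) ≠ [] := by
          intro hnil
          rw [List.map_eq_nil_iff] at hnil
          rw [hnil] at hestar2mem
          cases hestar2mem
        obtain ⟨b, hb⟩ : ∃ b, PySem.List.max? ((C.filter (fun e => decide (2 ≤ e))).map (pvG pos))
            (fun x => x) = some b := by
          cases h : PySem.List.max? ((C.filter (fun e => decide (2 ≤ e))).map (pvG pos)) (fun x => x) with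
          | none => exact absurd ((PySem.List.max?_eq_none_iff _ _).1 h) hBLne
          | some b => exact ⟨b, rfl⟩
        rw [hb]
        simp only [Option.getD_some]
        apply le_antisymm
        · -- b is attained at a candidate e with 2 ≤ e ≤ m0
          have hbmem := PySem.List.max?_mem hb
          obtain ⟨e, hef, rfl⟩ := List.mem_map.1 hbmem
          have he2 : 2 ≤ e := by
            have := (List.mem_filter.1 hef).2
            simpa using this
          have heC : e ∈ C := (List.mem_filter.1 hef).1
          have heM : e ≤ m0 := by
            rcases pv_foldl_cands_bound pos PySem.Set.empty e heC with h | h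
            · cases h
            · obtain ⟨L, hL, _, hle⟩ := h
              exact le_trans hle (hm0max L hL)
          apply pv_le_foldl_max_mem
          exact List.mem_map.2 ⟨e, PySem.List.mem_pyRange_one.2 ⟨he2, by omega⟩, rfl⟩
        · apply pv_foldl_max_le
          · -- 0 ≤ b via the i = m0 witness
            have h0 : 0 ≤ pvG pos estar2 := by
              have h1 : pvG pos m0 ≤ pvG pos estar2 := hestar2ge
              have h2 : 0 ≤ pvG pos m0 := by
                unfold pvG
                have h3 := hFnn m0 (by omega) (le_refl m0)
                have h4 : (0:Int) ≤ m0 - 1 := by omega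
                exact mul_nonneg h4 h3
              omega
            have := PySem.List.max?_isMax hb (pvG pos estar2)
              (List.mem_map.2 ⟨estar2, hestar2mem, rfl⟩)
            simp only at this
            omega
          · intro v hv
            obtain ⟨i, hi, rfl⟩ := List.mem_map.1 hv
            have hi' := PySem.List.mem_pyRange_one.1 hi
            obtain ⟨e, hef, hge⟩ := hGle i (by omega) (by omega)
            have := PySem.List.max?_isMax hb (pvG pos e) (List.mem_map.2 ⟨e, hef, rfl⟩)
            simp only at this
            omega
      rw [hbest]
      by_cases hbb : big < pvVal lens
      · rw [if_pos hbb]; omega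
      · rw [if_neg hbb]
        have : max big (pvVal lens) = big := max_eq_left (by omega)
        omega

-- ---- A side: inner dict characterisation ----
def pvInnerOK (lens : List Int) (d : Std.HashMap Int Int) : Prop :=
  ∀ i : Int, d[i]? = if i = 1 then some 0
    else if 2 ≤ i ∧ i ≤ pvMx (pvPos lens) then some (pvF (pvPos lens) i) else none

-- mid-loop value of profits[letter][i] while processing a run of length L, i ≤ j done
def pvFmid (pos : List Int) (L j i : Int) : Int :=
  if i ≤ j then pvF pos i + PySem.Int.floordiv L i else pvF pos i

def pvInv (pos : List Int) (L j : Int) (d : Std.HashMap Int Int) : Prop :=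
  ∀ i : Int, d[i]? = if i = 1 then some 0
    else if 2 ≤ i ∧ i ≤ max (pvMx pos) j then some (pvFmid pos L j i) else none

theorem pv_inv_step (pos : List Int) (L j : Int) (d : Std.HashMap Int Int)
    (hallpos : ∀ L' ∈ pos, 1 ≤ L' ∧ L' ≤ pvMx pos)
    (hj : 2 ≤ j) (h : pvInv pos L (j - 1) d) :
    pvInv pos L j
      (let d' := if d.contains j then d else d.insert j (-1)
       d'.insert j (d'.getD j 0 + PySem.Int.floordiv L j)) := by
  have hM1 : 1 ≤ pvMx pos := pv_one_le_mx pos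
  have hcont : d.contains j = decide (j ≤ max (pvMx pos) (j - 1)) := by
    rw [Std.HashMap.contains_eq_isSome_getElem?, h j, if_neg (by omega : ¬ j = 1)]
    by_cases hc : j ≤ max (pvMx pos) (j - 1)
    · rw [if_pos ⟨by omega, hc⟩]; simp [hc]
    · rw [if_neg (by omega)]; simp [hc]
  by_cases hjM : j ≤ pvMx pos
  · have hcj : d.contains j = true := by rw [hcont]; simp; omega
    simp only [hcj, if_true]
    have hmax : max (pvMx pos) j = max (pvMx pos) (j - 1) := by omega
    have hgd : d.getD j 0 = pvFmid pos L (j - 1) j := by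
      rw [Std.HashMap.getD_eq_getD_getElem?, h j, if_neg (by omega : ¬ j = 1),
        if_pos ⟨by omega, by omega⟩]
      rfl
    intro i
    rw [Std.HashMap.getElem?_insert]
    by_cases hij : j = i
    · subst hij
      rw [if_pos (by simp), hgd]
      rw [if_neg (by omega : ¬ j = 1), if_pos (by constructor <;> omega)]
      unfold pvFmid
      rw [if_neg (by omega), if_pos (by omega)]
    · rw [if_neg (by simp [hij]), h i]
      by_cases hi1 : i = 1
      · rw [if_pos hi1, if_pos hi1]
      · rw [if_neg hi1, if_neg hi1, hmax]
        by_cases hir : 2 ≤ i ∧ i ≤ max (pvMx pos) (j - 1)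
        · rw [if_pos hir, if_pos hir]
          unfold pvFmid
          by_cases hle : i ≤ j - 1
          · rw [if_pos hle, if_pos (by omega)]
          · rw [if_neg hle, if_neg (by omega)]
        · rw [if_neg hir, if_neg hir]
  · have hcj : d.contains j = false := by rw [hcont]; simp; omega
    simp only [hcj, if_false, Bool.false_eq_true]
    have hmax1 : max (pvMx pos) (j - 1) = j - 1 := by omega
    have hmax2 : max (pvMx pos) j = j := by omega
    have hFj : pvF pos j = -1 := by
      unfold pvF
      have : (pos.map (fun L' => PySem.Int.floordiv L' j)).sum = 0 := by
        apply List.sum_eq_zero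
        intro x hx
        obtain ⟨L', hL', rfl⟩ := List.mem_map.1 hx
        obtain ⟨ha, hb⟩ := hallpos L' hL'
        exact pv_fdiv_zero_of_lt L' j (by omega) (by omega)
      omega
    have hgd : (d.insert j (-1)).getD j 0 = -1 := Std.HashMap.getD_insert_self
    intro i
    rw [hgd, Std.HashMap.getElem?_insert]
    by_cases hij : j = i
    · subst hij
      rw [if_pos (by simp)]
      rw [if_neg (by omega : ¬ j = 1), if_pos (by constructor <;> omega)]
      unfold pvFmid
      rw [if_pos (by omega), hFj]
    · rw [if_neg (by simp [hij]), Std.HashMap.getElem?_insert, if_neg (by simp [hij]), h i]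
      by_cases hi1 : i = 1
      · rw [if_pos hi1, if_pos hi1]
      · rw [if_neg hi1, if_neg hi1, hmax1, hmax2]
        by_cases hir : 2 ≤ i ∧ i ≤ j - 1
        · rw [if_pos hir, if_pos (by omega)]
          unfold pvFmid
          rw [if_pos (by omega), if_pos (by omega)]
        · rw [if_neg hir, if_neg (by omega)]

theorem pv_inv_fold (pos : List Int) (L : Int) (d : Std.HashMap Int Int)
    (hallpos : ∀ L' ∈ pos, 1 ≤ L' ∧ L' ≤ pvMx pos)
    (h : pvInv pos L 1 d) :
    ∀ j, 1 ≤ j → pvInv pos L j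
      ((PySem.List.pyRange 2 (j + 1) 1).foldl
        (fun d i =>
          let d' := if d.contains i then d else d.insert i (-1)
          d'.insert i (d'.getD i 0 + PySem.Int.floordiv L i)) d) := by
  intro j hj
  induction j, hj using Int.le_induction with
  | base =>
    rw [PySem.List.pyRange_one_eq_nil (by norm_num)]
    exact h
  | succ j hj1 ih =>
    rw [PySem.List.pyRange_one_succ_right (by omega : (2:Int) ≤ j + 1), List.foldl_append]
    simp only [List.foldl_cons, List.foldl_nil]
    have := pv_inv_step pos L (j + 1) _ hallpos (by omega) (by simpa using ih)
    simpa using this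

theorem pv_filter_pos_append (lens : List Int) (L : Int) :
    pvPos (lens ++ [L]) = pvPos lens ++ (if 0 < L then [L] else []) := by
  unfold pvPos
  rw [List.filter_append]
  by_cases h : 0 < L <;> simp [h]

theorem pv_mx_append (pos : List Int) (L : Int) :
    pvMx (pos ++ [L]) = max (pvMx pos) L := by
  unfold pvMx
  rw [List.foldl_append]
  rfl

theorem pv_F_append (pos : List Int) (L i : Int) :
    pvF (pos ++ [L]) i = pvF pos i + PySem.Int.floordiv L i := by
  unfold pvF
  rw [List.map_append, List.sum_append]
  simp
  omega

theorem pv_inner_step (lens : List Int) (L : Int) (d : Std.HashMap Int Int)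
    (h : pvInnerOK lens d) : pvInnerOK (lens ++ [L]) (molassesInner d L) := by
  have hallpos : ∀ L' ∈ pvPos lens, 1 ≤ L' ∧ L' ≤ pvMx (pvPos lens) :=
    fun L' hL' => ⟨pv_pos_mem lens L' hL', pv_le_mx _ L' hL'⟩
  have hM1 := pv_one_le_mx (pvPos lens)
  unfold molassesInner
  by_cases hL2 : 2 ≤ L
  · -- the loop really runs, up to j = L
    have hInv1 : pvInv (pvPos lens) L 1 d := by
      intro i
      rw [h i, max_eq_left hM1]
      by_cases hi1 : i = 1
      · rw [if_pos hi1, if_pos hi1]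
      · rw [if_neg hi1, if_neg hi1]
        by_cases hir : 2 ≤ i ∧ i ≤ pvMx (pvPos lens)
        · rw [if_pos hir, if_pos hir]
          unfold pvFmid
          rw [if_neg (by omega)]
        · rw [if_neg hir, if_neg hir]
    have hfold := pv_inv_fold (pvPos lens) L d hallpos hInv1 L (by omega)
    have hpos' : pvPos (lens ++ [L]) = pvPos lens ++ [L] := by
      rw [pv_filter_pos_append, if_pos (by omega)]
    have hmx' : pvMx (pvPos (lens ++ [L])) = max (pvMx (pvPos lens)) L := by
      rw [hpos', pv_mx_append]
    intro i
    rw [hfold i, hmx']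
    by_cases hi1 : i = 1
    · rw [if_pos hi1, if_pos hi1]
    · rw [if_neg hi1, if_neg hi1]
      by_cases hir : 2 ≤ i ∧ i ≤ max (pvMx (pvPos lens)) L
      · rw [if_pos hir, if_pos hir, hpos', pv_F_append]
        unfold pvFmid
        by_cases hiL : i ≤ L
        · rw [if_pos hiL]
        · rw [if_neg hiL]
          have h0 : PySem.Int.floordiv L i = 0 := pv_fdiv_zero_of_lt L i (by omega) (by omega)
          rw [h0, add_zero]
      · rw [if_neg hir, if_neg hir]
  · -- L ≤ 1: the range is empty and the dict is unchanged
    rw [PySem.List.pyRange_one_eq_nil (by omega)]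
    simp only [List.foldl_nil]
    by_cases hL0 : 0 < L
    · have hL1 : L = 1 := by omega
      subst hL1
      have hpos' : pvPos (lens ++ [1]) = pvPos lens ++ [1] := by
        rw [pv_filter_pos_append, if_pos (by norm_num)]
      have hmx' : pvMx (pvPos (lens ++ [1])) = pvMx (pvPos lens) := by
        rw [hpos', pv_mx_append]
        omega
      intro i
      rw [h i, hmx']
      by_cases hi1 : i = 1
      · rw [if_pos hi1, if_pos hi1]
      · rw [if_neg hi1, if_neg hi1]
        by_cases hir : 2 ≤ i ∧ i ≤ pvMx (pvPos lens)
        · rw [if_pos hir, if_pos hir, hpos', pv_F_append,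
            pv_fdiv_zero_of_lt 1 i (by norm_num) (by omega), add_zero]
        · rw [if_neg hir, if_neg hir]
    · have hpos' : pvPos (lens ++ [L]) = pvPos lens := by
        rw [pv_filter_pos_append, if_neg hL0]
        simp
      intro i
      rw [h i, hpos']

theorem pv_innerOK_init : pvInnerOK [] ((∅ : Std.HashMap Int Int).insert 1 0) := by
  intro i
  rw [Std.HashMap.getElem?_insert, Std.HashMap.getElem?_empty]
  rw [show pvMx (pvPos ([] : List Int)) = 1 from rfl]
  by_cases hi1 : i = 1
  · rw [if_pos (by simp [hi1]), if_pos hi1]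
  · rw [if_neg (by simp; omega), if_neg hi1, if_neg (by omega)]

-- value A extracts from an inner dict
theorem pv_inner_val (lens : List Int) (d : Std.HashMap Int Int) (h : pvInnerOK lens d) :
    (PySem.List.max? (d.toList.map (fun q => (q.1 - 1) * q.2)) (fun x => x)).getD 0
      = pvVal lens := by
  have hmem : ∀ (k v : Int), (k, v) ∈ d.toList ↔ d[k]? = some v :=
    fun k v => Std.HashMap.mem_toList_iff_getElem?_eq_some
  have h10 : ((1:Int), (0:Int)) ∈ d.toList := (hmem 1 0).2 (by rw [h 1]; simp)
  have h0mem : (0:Int) ∈ d.toList.map (fun q => (q.1 - 1) * q.2) :=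
    List.mem_map.2 ⟨(1, 0), h10, by norm_num⟩
  obtain ⟨b, hb⟩ : ∃ b, PySem.List.max? (d.toList.map (fun q => (q.1 - 1) * q.2))
      (fun x => x) = some b := by
    cases hh : PySem.List.max? (d.toList.map (fun q => (q.1 - 1) * q.2)) (fun x => x) with
    | none =>
      rw [(PySem.List.max?_eq_none_iff _ _).1 hh] at h0mem
      cases h0mem
    | some b => exact ⟨b, rfl⟩
  rw [hb]
  simp only [Option.getD_some]
  apply le_antisymm
  · have hbm := PySem.List.max?_mem hb
    obtain ⟨⟨k, v⟩, hkv, rfl⟩ := List.mem_map.1 hbm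
    have hkv' := (hmem k v).1 hkv
    rw [h k] at hkv'
    by_cases hk1 : k = 1
    · rw [if_pos hk1] at hkv'
      injection hkv' with hv
      subst hk1
      rw [← hv]
      simp only [sub_self, one_mul, zero_mul]
      exact pv_le_foldl_max_init _ 0
    · by_cases hkr : 2 ≤ k ∧ k ≤ pvMx (pvPos lens)
      · rw [if_neg hk1, if_pos hkr] at hkv'
        injection hkv' with hv
        subst hv
        exact pv_le_foldl_max_mem _ 0 _
          (List.mem_map.2 ⟨k, PySem.List.mem_pyRange_one.2 ⟨by omega, by omega⟩, rfl⟩)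
      · rw [if_neg hk1, if_neg hkr] at hkv'
        cases hkv'
  · apply pv_foldl_max_le
    · have := PySem.List.max?_isMax hb 0 h0mem
      simpa using this
    · intro v hv
      obtain ⟨i, hi, rfl⟩ := List.mem_map.1 hv
      have hi' := PySem.List.mem_pyRange_one.1 hi
      have hpair : (i, pvF (pvPos lens) i) ∈ d.toList := (hmem _ _).2
        (by rw [h i, if_neg (by omega), if_pos ⟨by omega, by omega⟩])
      have := PySem.List.max?_isMax hb _
        (List.mem_map.2 ⟨(i, pvF (pvPos lens) i), hpair, rfl⟩)
      simpa [pvG] using this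

-- ---- A side: profits dict characterisation ----
def pvProfitsOK (rs : List (Char × Int)) (pr : PySem.Dict Char (Std.HashMap Int Int)) : Prop :=
  pr.keys = PySem.Set.ofList (rs.map (·.1)) ∧
  ∀ a ∈ pr.keys, pvInnerOK (pvLens rs a) (pr.getD a ∅)

theorem pv_profits_inv (rs : List (Char × Int)) :
    pvProfitsOK rs (rs.foldl
      (fun pr p =>
        let pr' := if pr.contains p.1 then pr else pr.insert p.1 ((∅ : Std.HashMap Int Int).insert 1 0)
        pr'.insert p.1 (molassesInner (pr'.getD p.1 ∅) p.2))
      PySem.Dict.empty) := by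
  suffices haux : ∀ (rs : List (Char × Int)) (rs0 : List (Char × Int))
      (pr : PySem.Dict Char (Std.HashMap Int Int)), pvProfitsOK rs0 pr →
      pvProfitsOK (rs0 ++ rs) (rs.foldl
        (fun pr p =>
          let pr' := if pr.contains p.1 then pr else pr.insert p.1 ((∅ : Std.HashMap Int Int).insert 1 0)
          pr'.insert p.1 (molassesInner (pr'.getD p.1 ∅) p.2))
        pr) by
    have := haux rs [] PySem.Dict.empty ⟨by simp [PySem.Dict.keys_empty], by simp [PySem.Dict.keys_empty]⟩
    simpa using this
  intro rs
  induction rs with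
  | nil => intro rs0 pr h; simpa using h
  | cons p t ih =>
    intro rs0 pr h
    obtain ⟨hkeys, hvals⟩ := h
    simp only [List.foldl_cons]
    have hstep : pvProfitsOK (rs0 ++ [p])
        (let pr' := if pr.contains p.1 then pr else pr.insert p.1 ((∅ : Std.HashMap Int Int).insert 1 0)
         pr'.insert p.1 (molassesInner (pr'.getD p.1 ∅) p.2)) := by
      have hmapfst : (rs0 ++ [p]).map (·.1) = rs0.map (·.1) ++ [p.1] := by simp
      have hlens_self : pvLens (rs0 ++ [p]) p.1 = pvLens rs0 p.1 ++ [p.2] := by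
        unfold pvLens
        rw [List.filter_append]
        simp
      have hlens_other : ∀ a, a ≠ p.1 → pvLens (rs0 ++ [p]) a = pvLens rs0 a := by
        intro a ha
        unfold pvLens
        rw [List.filter_append]
        have : (p.1 == a) = false := by
          simp
          exact fun hc => ha hc.symm
        simp [this]
      by_cases hc : pr.contains p.1 = true
      · simp only [hc, if_true]
        have hmem : p.1 ∈ pr.keys := (PySem.Dict.contains_iff_mem_keys _ _).1 hc
        constructor
        · rw [PySem.Dict.keys_insert_of_contains _ _ hc, hkeys, hmapfst,
            PySem.Set.ofList_append_singleton,
            PySem.Set.add_of_mem (by rw [← hkeys]; exact hmem)]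
        · intro a ha
          rw [PySem.Dict.keys_insert_of_contains _ _ hc] at ha
          by_cases hap : a = p.1
          · subst hap
            rw [PySem.Dict.getD_insert_self, hlens_self]
            exact pv_inner_step _ _ _ (hvals p.1 hmem)
          · rw [PySem.Dict.getD_insert_of_ne _ _ _ hap, hlens_other a hap]
            exact hvals a ha
      · have hnmem : p.1 ∉ pr.keys := by
          intro hmem
          rw [(PySem.Dict.contains_iff_mem_keys _ _).2 hmem] at hc
          exact hc rfl
        have hcf : pr.contains p.1 = false := by
          cases hcc : pr.contains p.1
          · rfl
          · exact absurd hcc hc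
        have hlens_nil : pvLens rs0 p.1 = [] := by
          unfold pvLens
          rw [List.filter_eq_nil_iff.2, List.map_nil]
          intro q hq hq1
          rw [beq_iff_eq] at hq1
          apply hnmem
          rw [hkeys, PySem.Set.mem_ofList]
          exact List.mem_map.2 ⟨q, hq, hq1⟩
        simp only [hcf, Bool.false_eq_true, if_false]
        rw [PySem.Dict.getD_insert_self, PySem.Dict.insert_insert_self]
        constructor
        · rw [PySem.Dict.keys_insert_of_not_contains _ _ hcf, hkeys, hmapfst,
            PySem.Set.ofList_append_singleton,
            PySem.Set.add_of_not_mem (by rw [← hkeys]; exact hnmem)]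
        · intro a ha
          by_cases hap : a = p.1
          · subst hap
            rw [PySem.Dict.getD_insert_self, hlens_self, hlens_nil]
            have := pv_inner_step [] p.2 _ pv_innerOK_init
            simpa using this
          · rw [PySem.Dict.getD_insert_of_ne _ _ _ hap, hlens_other a hap]
            apply hvals
            rw [PySem.Dict.keys_insert_of_not_contains _ _ hcf] at ha
            rcases List.mem_append.1 ha with h | h
            · exact h
            · simp at h; exact absurd h hap
    have := ih (rs0 ++ [p]) _ hstep
    simpa using this

-- ---- B side: groups dict characterisation ----
theorem pv_groups_inv (xs : List (Char × Int)) :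
    ((xs.foldl
      (fun (st : Option Char × PySem.Dict Char (List Int)) p =>
        if st.1 == some p.1 then
          (some p.1, st.2.modify p.1 [] (fun ls => ls.dropLast ++ [PySem.List.pyGetD ls (-1) 0 + p.2]))
        else
          (some p.1, st.2.modify p.1 [] (fun ls => ls ++ [p.2])))
      ((none : Option Char), PySem.Dict.empty)).1
        = ((xs.foldl molassesCompress []).map (·.1)).getLast?) ∧
    ((xs.foldl
      (fun (st : Option Char × PySem.Dict Char (List Int)) p =>
        if st.1 == some p.1 then
          (some p.1, st.2.modify p.1 [] (fun ls => ls.dropLast ++ [PySem.List.pyGetD ls (-1) 0 + p.2]))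
        else
          (some p.1, st.2.modify p.1 [] (fun ls => ls ++ [p.2])))
      ((none : Option Char), PySem.Dict.empty)).2.keys
        = PySem.Set.ofList ((xs.foldl molassesCompress []).map (·.1))) ∧
    (∀ a, ((xs.foldl
      (fun (st : Option Char × PySem.Dict Char (List Int)) p =>
        if st.1 == some p.1 then
          (some p.1, st.2.modify p.1 [] (fun ls => ls.dropLast ++ [PySem.List.pyGetD ls (-1) 0 + p.2]))
        else
          (some p.1, st.2.modify p.1 [] (fun ls => ls ++ [p.2])))
      ((none : Option Char), PySem.Dict.empty)).2.getD a []
        = pvLens (xs.foldl molassesCompress []) a)) := by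
  suffices aux : (∀ (xs : List (Char × Int)) (st : Option Char × PySem.Dict Char (List Int))
      (comp : List (Char × Int)),
      (st.1 = (comp.map (·.1)).getLast? ∧ st.2.keys = PySem.Set.ofList (comp.map (·.1)) ∧
        ∀ a, st.2.getD a [] = pvLens comp a) →
      (xs.foldl
        (fun (st : Option Char × PySem.Dict Char (List Int)) p =>
          if st.1 == some p.1 then
            (some p.1, st.2.modify p.1 [] (fun ls => ls.dropLast ++ [PySem.List.pyGetD ls (-1) 0 + p.2]))
          else
            (some p.1, st.2.modify p.1 [] (fun ls => ls ++ [p.2])))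
        st).1 = ((xs.foldl molassesCompress comp).map (·.1)).getLast? ∧
      (xs.foldl
        (fun (st : Option Char × PySem.Dict Char (List Int)) p =>
          if st.1 == some p.1 then
            (some p.1, st.2.modify p.1 [] (fun ls => ls.dropLast ++ [PySem.List.pyGetD ls (-1) 0 + p.2]))
          else
            (some p.1, st.2.modify p.1 [] (fun ls => ls ++ [p.2])))
        st).2.keys = PySem.Set.ofList ((xs.foldl molassesCompress comp).map (·.1)) ∧
      ∀ a, (xs.foldl
        (fun (st : Option Char × PySem.Dict Char (List Int)) p =>
          if st.1 == some p.1 then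
            (some p.1, st.2.modify p.1 [] (fun ls => ls.dropLast ++ [PySem.List.pyGetD ls (-1) 0 + p.2]))
          else
            (some p.1, st.2.modify p.1 [] (fun ls => ls ++ [p.2])))
        st).2.getD a [] = pvLens (xs.foldl molassesCompress comp) a) by
    exact aux xs ((none : Option Char), PySem.Dict.empty) []
      ⟨rfl, (by simp [PySem.Dict.keys_empty]), fun a => (by simp [PySem.Dict.getD_empty]; rfl)⟩
  intro xs
  induction xs with
  | nil => intro st comp h; simpa using h
  | cons p t ih =>
    intro st comp h
    obtain ⟨hprev, hkeys, hgetD⟩ := h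
    simp only [List.foldl_cons]
    apply ih
    rcases List.eq_nil_or_concat comp with rfl | ⟨ys, q, rfl⟩
    · -- empty compressor so far: both conditions are false, a fresh run starts
      have hA : molassesCompress [] p = [p] := by
        unfold molassesCompress
        rw [if_neg (by simp)]
        rfl
      have hprev' : st.1 = none := by simpa using hprev
      have hB : (st.1 == some p.1) = false := by rw [hprev']; rfl
      rw [hA, hB]
      simp only [Bool.false_eq_true, if_false]
      refine ⟨by simp, ?_, ?_⟩
      · have hc : st.2.contains p.1 = false := by
          rw [PySem.Dict.contains_eq_decide_mem_keys, hkeys]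
          simp
        rw [PySem.Dict.keys_modify, PySem.Dict.keys_insert_of_not_contains _ _ hc, hkeys]
        simp only [List.map_nil, PySem.Set.ofList_nil, List.nil_append, List.map_cons]
        exact (PySem.Set.ofList_eq_self_of_nodup _ (List.nodup_singleton _)).symm
      · intro a
        rw [PySem.Dict.getD_modify]
        by_cases hap : a = p.1
        · subst hap
          rw [if_pos rfl, hgetD]
          unfold pvLens
          simp
        · rw [if_neg hap, hgetD]
          unfold pvLens
          have : (p.1 == a) = false := by simp; exact fun hcc => hap hcc.symm
          simp [this]
    · rw [List.concat_eq_append] at *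
      obtain ⟨a, m⟩ := q
      have hlast : st.1 = some a := by rw [hprev]; simp
      by_cases hap : a = p.1
      · subst hap
        have hB : (st.1 == some p.1) = true := by rw [hlast]; simp
        have hA : molassesCompress (ys ++ [(p.1, m)]) p = ys ++ [(p.1, m + p.2)] := by
          unfold molassesCompress
          rw [if_pos]
          · rw [List.dropLast_concat, PySem.List.pyGetD_neg_one_append_singleton]
          · constructor
            · simp
            · rw [PySem.List.pyGetD_neg_one_append_singleton]
        rw [hA, hB]
        simp only [if_true]
        refine ⟨by simp [List.getLast?_concat], ?_, ?_⟩
        · have hc : st.2.contains p.1 = true := by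
            rw [PySem.Dict.contains_eq_decide_mem_keys, hkeys]
            simp
          rw [PySem.Dict.keys_modify, PySem.Dict.keys_insert_of_contains _ _ hc, hkeys]
          simp
        · intro c
          rw [PySem.Dict.getD_modify]
          by_cases hcp : c = p.1
          · subst hcp
            rw [if_pos rfl, hgetD]
            have hl : pvLens (ys ++ [(p.1, m)]) p.1 = pvLens ys p.1 ++ [m] := by
              unfold pvLens
              rw [List.filter_append]
              simp
            have hl2 : pvLens (ys ++ [(p.1, m + p.2)]) p.1 = pvLens ys p.1 ++ [m + p.2] := by
              unfold pvLens
              rw [List.filter_append]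
              simp
            rw [hl, hl2, List.dropLast_concat, PySem.List.pyGetD_neg_one_append_singleton]
          · rw [if_neg hcp, hgetD]
            unfold pvLens
            rw [List.filter_append, List.filter_append]
            have hb : (p.1 == c) = false := by
              simp
              exact fun h => hcp h.symm
            simp [hb]
      · have hB : (st.1 == some p.1) = false := by
          rw [hlast]
          simp
          exact hap
        have hA : molassesCompress (ys ++ [(a, m)]) p = (ys ++ [(a, m)]) ++ [p] := by
          unfold molassesCompress
          rw [if_neg]
          intro hcontra
          obtain ⟨h1, h2⟩ := hcontra
          rw [PySem.List.pyGetD_neg_one_append_singleton] at h2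
          exact hap h2
        rw [hA, hB]
        simp only [Bool.false_eq_true, if_false]
        refine ⟨by simp [List.getLast?_concat], ?_, ?_⟩
        · rw [PySem.Dict.keys_modify]
          have hfst : (ys ++ [(a, m)] ++ [p]).map (·.1) = (ys ++ [(a, m)]).map (·.1) ++ [p.1] := by
            simp
          rw [hfst, PySem.Set.ofList_append_singleton, PySem.Set.add_eq_ite]
          by_cases hmemp : p.1 ∈ PySem.Set.ofList ((ys ++ [(a, m)]).map (·.1))
          · have hc : st.2.contains p.1 = true := by
              rw [PySem.Dict.contains_eq_decide_mem_keys, hkeys]; simpa using hmemp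
            rw [PySem.Dict.keys_insert_of_contains _ _ hc, hkeys, if_pos hmemp]
          · have hc : st.2.contains p.1 = false := by
              rw [PySem.Dict.contains_eq_decide_mem_keys, hkeys]; simpa using hmemp
            rw [PySem.Dict.keys_insert_of_not_contains _ _ hc, hkeys, if_neg hmemp]
        · intro c
          rw [PySem.Dict.getD_modify]
          by_cases hcp : c = p.1
          · subst hcp
            rw [if_pos rfl, hgetD]
            unfold pvLens
            have ha' : (a == p.1) = false := by
              simp
              exact hap
            simp [List.filter_append, ha']
          · rw [if_neg hcp, hgetD]
            unfold pvLens
            have ha' : (p.1 == c) = false := by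
              simp
              exact fun h => hcp h.symm
            simp only [List.filter_append]
            simp [ha']

-- B's fold over the letters, rewritten as a running max of per-letter values
theorem pv_foldlB_bridge (ks : List Char) (g : Char → List Int) :
    ∀ acc : Int, 0 ≤ acc →
    ks.foldl (fun big a =>
      let pos := (g a).filter (fun L => decide (0 < L))
      if pos = [] then big
      else
        let m := (PySem.List.max? pos (fun x => x)).getD 0
        if m < 2 then big
        else
          let cands := pos.foldl (fun s L => blockCands L 1 s (by norm_num)) PySem.Set.empty
          let best := (PySem.List.max?
            ((cands.filter (fun e => decide (2 ≤ e))).map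
              (fun e => (e - 1) * ((pos.map (fun L => PySem.Int.floordiv L e)).sum - 1)))
            (fun x => x)).getD 0
          if big < best then best else big) acc
    = ks.foldl (fun big a => max big (pvVal (g a))) acc := by
  induction ks with
  | nil => intro acc hacc; rfl
  | cons k t ih =>
    intro acc hacc
    simp only [List.foldl_cons]
    rw [pv_bodyB_eq acc (g k) hacc]
    exact ih (max acc (pvVal (g k))) (le_trans hacc (le_max_left _ _))

-- ===== VERDICT (by name: the statement is the Claim_ definition above) =====
theorem molasses_spec : Claim_equal_molasses := by
  intro n c l hdom
  unfold Spec_molasses molasses molasses_alt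
  simp only []
  obtain ⟨hkeysA, hvalsA⟩ := pv_profits_inv ((c.toList.zip l).foldl molassesCompress [])
  obtain ⟨hprevB, hkeysB, hgetDB⟩ := pv_groups_inv (c.toList.zip l)
  have hbig :
      (((c.toList.zip l).foldl molassesCompress []).foldl
        (fun pr p =>
          let pr' := if pr.contains p.1 then pr else pr.insert p.1 ((∅ : Std.HashMap Int Int).insert 1 0)
          pr'.insert p.1 (molassesInner (pr'.getD p.1 ∅) p.2))
        PySem.Dict.empty).values.foldl
          (fun acc m => max acc ((PySem.List.max? (m.toList.map (fun q => (q.1 - 1) * q.2)) (fun x => x)).getD 0)) (0 : Int)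
      = ((c.toList.zip l).foldl
          (fun (st : Option Char × PySem.Dict Char (List Int)) p =>
            if st.1 == some p.1 then
              (some p.1, st.2.modify p.1 [] (fun ls => ls.dropLast ++ [PySem.List.pyGetD ls (-1) 0 + p.2]))
            else
              (some p.1, st.2.modify p.1 [] (fun ls => ls ++ [p.2])))
          ((none : Option Char), PySem.Dict.empty)).2.values.foldl
          (fun big lens =>
            let pos := lens.filter (fun L => decide (0 < L))
            if pos = [] then big
            else
              let m := (PySem.List.max? pos (fun x => x)).getD 0
              if m < 2 then big
              else
                let cands := pos.foldl (fun s L => blockCands L 1 s (by norm_num)) PySem.Set.empty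
                let best := (PySem.List.max?
                  ((cands.filter (fun e => decide (2 ≤ e))).map
                    (fun e => (e - 1) * ((pos.map (fun L => PySem.Int.floordiv L e)).sum - 1)))
                  (fun x => x)).getD 0
                if big < best then best else big) (0 : Int) := by
    have hndA : (((c.toList.zip l).foldl molassesCompress []).foldl
        (fun pr p =>
          let pr' := if pr.contains p.1 then pr else pr.insert p.1 ((∅ : Std.HashMap Int Int).insert 1 0)
          pr'.insert p.1 (molassesInner (pr'.getD p.1 ∅) p.2))
        PySem.Dict.empty).keys.Nodup := by
      rw [hkeysA]; exact PySem.Set.nodup_ofList _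
    have hndB : ((c.toList.zip l).foldl
        (fun (st : Option Char × PySem.Dict Char (List Int)) p =>
          if st.1 == some p.1 then
            (some p.1, st.2.modify p.1 [] (fun ls => ls.dropLast ++ [PySem.List.pyGetD ls (-1) 0 + p.2]))
          else
            (some p.1, st.2.modify p.1 [] (fun ls => ls ++ [p.2])))
        ((none : Option Char), PySem.Dict.empty)).2.keys.Nodup := by
      rw [hkeysB]; exact PySem.Set.nodup_ofList _
    rw [PySem.Dict.values_eq_map_keys _ hndA ∅,
      PySem.Dict.values_eq_map_keys _ hndB ([] : List Int)]
    rw [List.foldl_map, List.foldl_map]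
    rw [PySem.List.foldl_congr_mem _ _
      (fun acc a => max acc (pvVal (pvLens ((c.toList.zip l).foldl molassesCompress []) a))) 0
      (fun acc a ha => by rw [pv_inner_val _ _ (hvalsA a ha)])]
    rw [hkeysA, hkeysB]
    have hbridge := pv_foldlB_bridge
      (PySem.Set.ofList (((c.toList.zip l).foldl molassesCompress []).map (·.1)))
      (fun a => ((c.toList.zip l).foldl
        (fun (st : Option Char × PySem.Dict Char (List Int)) p =>
          if st.1 == some p.1 then
            (some p.1, st.2.modify p.1 [] (fun ls => ls.dropLast ++ [PySem.List.pyGetD ls (-1) 0 + p.2]))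
          else
            (some p.1, st.2.modify p.1 [] (fun ls => ls ++ [p.2])))
        ((none : Option Char), PySem.Dict.empty)).2.getD a []) 0 le_rfl
    rw [hbridge]
    apply PySem.List.foldl_congr_mem
    intro acc a ha
    rw [← hgetDB a]
  rw [hbig]
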